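-- pv_equiv track=rewrite | github.com/IgorV-e-t-e-r-a-n/file_activity_tracker | File_activity_tracker.py | compare_permissions
-- ===== SOURCE A (Python) =====
-- def compare_permissions(baseline, current):
--     """Compare baseline and current permissions."""
--     changes = {}
--     for path, perm in current.items():
--         if path not in baseline:
--             changes[path] = ("New", None, perm)
--         elif baseline[path] != perm:
--             changes[path] = ("Modified", baseline[path], perm)
--     return changes
-- ===== SOURCE B (Python) =====
-- def compare_permissions(baseline, current):
--     """Compare baseline and current permissions."""
--     # Start from "everything in current is New", then repair against baseline:
--     # the second pass deletes unchanged entries and rewrites common ones to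
--     # Modified (overwrite keeps position, so the order stays current's order).
--     changes = {path: ("New", None, perm) for path, perm in current.items()}
--     for path, old in baseline.items():
--         tag = changes.get(path)
--         if tag is not None:
--             perm = tag[2]
--             if old == perm:
--                 del changes[path]
--             else:
--                 changes[path] = ("Modified", old, perm)
--     return changes
-- ===== Notes on version B (the rewrite author's own statement) =====
-- stated objective: alternative
-- what changed: Instead of A's single branching pass that conditionally inserts into an initially empty dict, B builds a full candidate dict marking every current entry 'New' in one comprehension and then runs a second repair pass over baseline that deletes unchanged entries and overwrites common ones to 'Modified' (overwrite keeps position and deletion removes, so the result and its order match A exactly).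
import Mathlib
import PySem

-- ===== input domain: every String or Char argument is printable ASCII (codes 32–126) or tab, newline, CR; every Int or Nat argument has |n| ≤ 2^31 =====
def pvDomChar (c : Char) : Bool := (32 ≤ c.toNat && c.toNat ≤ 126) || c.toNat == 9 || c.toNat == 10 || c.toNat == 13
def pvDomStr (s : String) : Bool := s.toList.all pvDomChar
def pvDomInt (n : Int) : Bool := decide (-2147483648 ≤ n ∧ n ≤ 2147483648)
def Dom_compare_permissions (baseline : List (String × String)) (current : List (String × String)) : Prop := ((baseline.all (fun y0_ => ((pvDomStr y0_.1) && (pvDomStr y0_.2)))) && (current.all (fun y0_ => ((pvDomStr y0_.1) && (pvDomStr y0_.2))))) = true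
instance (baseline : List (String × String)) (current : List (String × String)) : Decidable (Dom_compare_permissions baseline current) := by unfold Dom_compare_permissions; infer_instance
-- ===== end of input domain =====

-- B replaces A's single conditional-insert pass by a build-then-repair scheme: mark every
-- current entry "New" first, then a second pass over baseline deletes unchanged entries and
-- overwrites common ones to "Modified"; same cost, a genuinely different decomposition.

-- ===== PORT A =====
def compare_permissions (baseline : List (String × String)) (current : List (String × String)) : List (String × String × Option String × String) :=
  (current.foldl
    (fun (changes : PySem.Dict String (String × Option String × String)) pv =>
      match (PySem.Dict.mk baseline).get? pv.1 with
      | none => changes.insert pv.1 ("New", none, pv.2)          -- path not in baseline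
      | some old =>                                              -- elif baseline[path] != perm
        if old ≠ pv.2 then changes.insert pv.1 ("Modified", some old, pv.2) else changes)
    PySem.Dict.empty).items

-- ===== PORT B =====
def compare_permissions_alt (baseline : List (String × String)) (current : List (String × String)) : List (String × String × Option String × String) :=
  -- phase 1: the dict comprehension {path: ("New", None, perm) for path, perm in current.items()}
  -- phase 2: the repair loop over baseline.items() (del / overwrite-in-place)
  (baseline.foldl
    (fun (changes : PySem.Dict String (String × Option String × String)) po =>
      match changes.get? po.1 with                               -- tag = changes.get(path)
      | none => changes
      | some tag =>
        if po.2 = tag.2.2 then changes.erase po.1                -- old == perm: del changes[path]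
        else changes.insert po.1 ("Modified", some po.2, tag.2.2))
    (current.foldl (fun (d : PySem.Dict String (String × Option String × String)) pv =>
      d.insert pv.1 ("New", none, pv.2)) PySem.Dict.empty)).items

-- ===== PRECONDITION & SPEC =====
-- Pre_ requires both key lists to be distinct: a key-duplicating association list is not the
-- encoding of any Python dict (A's arguments are dicts and cannot contain duplicate keys),
-- and on such lists the two ports' accidental treatments of the duplicates differ.
def Pre_compare_permissions (baseline : List (String × String)) (current : List (String × String)) : Prop :=
  (baseline.map Prod.fst).Nodup ∧ (current.map Prod.fst).Nodup
instance (baseline : List (String × String)) (current : List (String × String)) : Decidable (Pre_compare_permissions baseline current) := by unfold Pre_compare_permissions; infer_instance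

def pvWitness_compare_permissions : (List (String × String)) × (List (String × String)) :=
  ([("a", "rw"), ("b", "r"), ("d", "x")], [("a", "rw"), ("b", "rwx"), ("c", "r")])

def Spec_compare_permissions (baseline : List (String × String)) (current : List (String × String)) (out : List (String × String × Option String × String)) : Prop := out = compare_permissions_alt baseline current
instance (baseline : List (String × String)) (current : List (String × String)) (out : List (String × String × Option String × String)) : Decidable (Spec_compare_permissions baseline current out) := by unfold Spec_compare_permissions; infer_instance

-- ===== CLAIM (what is proved, stated in full; the proofs are below) =====
def Claim_equal_compare_permissions : Prop := ∀ (baseline : List (String × String)) (current : List (String × String)), Dom_compare_permissions baseline current → Pre_compare_permissions baseline current → Spec_compare_permissions baseline current (compare_permissions baseline current)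

-- ===== LEMMAS AND PROOFS =====

-- Common reference form: both ports compute this filterMap over current.
def cpRef (baseline : List (String × String)) (current : List (String × String)) : List (String × String × Option String × String) :=
  current.filterMap (fun pv =>
    match (PySem.Dict.mk baseline).get? pv.1 with
    | none => some (pv.1, ("New", none, pv.2))
    | some old => if old ≠ pv.2 then some (pv.1, ("Modified", some old, pv.2)) else none)

-- A's fold from a dict whose keys avoid current's (distinct) keys appends exactly cpRef.
theorem cp_fold_items (baseline : List (String × String)) :
    ∀ (current : List (String × String)) (d : PySem.Dict String (String × Option String × String)),
      (current.map Prod.fst).Nodup →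
      (∀ p ∈ current.map Prod.fst, d.contains p = false) →
      (current.foldl
        (fun changes pv =>
          match (PySem.Dict.mk baseline).get? pv.1 with
          | none => changes.insert pv.1 ("New", none, pv.2)
          | some old =>
            if old ≠ pv.2 then changes.insert pv.1 ("Modified", some old, pv.2) else changes)
        d).items
      = d.items ++ cpRef baseline current := by
  intro current
  induction current with
  | nil => intro d _ _; simp [cpRef]
  | cons pv rest ih =>
    intro d hnd hdisj
    rw [List.map_cons] at hnd
    obtain ⟨hp, hr⟩ := List.nodup_cons.mp hnd
    have hdc : d.contains pv.1 = false := hdisj pv.1 (by simp)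
    have hrest : ∀ t, ∀ p ∈ rest.map Prod.fst, (d.insert pv.1 t).contains p = false := by
      intro t p hpmem
      rw [PySem.Dict.contains_insert]
      have : p ≠ pv.1 := fun h => hp (h ▸ hpmem)
      simp [this, hdisj p (by simp [hpmem])]
    cases hb : (PySem.Dict.mk baseline).get? pv.1 with
    | none =>
      simp only [List.foldl_cons, hb]
      rw [ih (d.insert pv.1 ("New", none, pv.2)) hr (hrest _),
          PySem.Dict.items_insert_of_not_contains _ _ hdc]
      simp [cpRef, hb]
    | some old =>
      by_cases he : old = pv.2
      · subst he
        simp only [List.foldl_cons, hb, ne_eq, not_true_eq_false, if_false]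
        rw [ih d hr (fun p hp' => hdisj p (List.mem_cons_of_mem _ hp'))]
        simp [cpRef, hb]
      · simp only [List.foldl_cons, hb, ne_eq, he, not_false_eq_true, if_true]
        rw [ih (d.insert pv.1 ("Modified", some old, pv.2)) hr (hrest _),
            PySem.Dict.items_insert_of_not_contains _ _ hdc]
        simp [cpRef, hb, he]

-- If d.get? p = none then no item of d has key p.
theorem cp_key_ne_of_get?_none (d : PySem.Dict String (String × Option String × String))
    (p : String) (h : d.get? p = none) :
    ∀ e ∈ d.items, e.1 ≠ p := by
  intro e he
  have hk := (PySem.Dict.get?_eq_none_iff_not_mem_keys d p).mp h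
  intro hep
  exact hk (hep ▸ PySem.Dict.mem_keys_of_mem_items d he)

-- Generic list fact: deleting the p-keyed entries and mapping g equals filterMap with f,
-- when f kills p-keyed entries and agrees with g elsewhere.
theorem cp_filterMap_filter {α β : Type} (p : String)
    (f g : (String × α) → Option β) (l : List (String × α))
    (h0 : ∀ e ∈ l, e.1 = p → f e = none)
    (h1 : ∀ e ∈ l, e.1 ≠ p → f e = g e) :
    l.filterMap f = (l.filter (fun e => !(e.1 == p))).filterMap g := by
  induction l with
  | nil => simp
  | cons e rest ih =>
    have ih' := ih (fun x hx => h0 x (List.mem_cons_of_mem _ hx))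
                   (fun x hx => h1 x (List.mem_cons_of_mem _ hx))
    by_cases hep : e.1 = p
    · have := h0 e (List.mem_cons_self) hep
      simp [hep, this, ih']
    · have hfe := h1 e (List.mem_cons_self) hep
      have hkeep : (!(e.1 == p)) = true := by simp [hep]
      rw [List.filterMap_cons, List.filter_cons, hkeep]
      simp only [if_true, List.filterMap_cons]
      rw [hfe, ih']

-- The repair pass acts pointwise on the items list (keys of d and of baseline distinct).
theorem cp_repair_items :
    ∀ (baseline : List (String × String))
      (d : PySem.Dict String (String × Option String × String)),
      (baseline.map Prod.fst).Nodup → d.keys.Nodup →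
      (baseline.foldl
        (fun changes po =>
          match changes.get? po.1 with
          | none => changes
          | some tag =>
            if po.2 = tag.2.2 then changes.erase po.1
            else changes.insert po.1 ("Modified", some po.2, tag.2.2))
        d).items
      = d.items.filterMap (fun e =>
          match (PySem.Dict.mk baseline).get? e.1 with
          | none => some e
          | some old => if old = e.2.2.2 then none else some (e.1, ("Modified", some old, e.2.2.2))) := by
  intro baseline
  induction baseline with
  | nil =>
    intro d _ _
    simp [PySem.Dict.get?]
  | cons po rest ih =>
    intro d hnd hdk
    rw [List.map_cons] at hnd
    obtain ⟨hpo, hr⟩ := List.nodup_cons.mp hnd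
    have hrest_none : (PySem.Dict.mk rest).get? po.1 = none := by
      rw [PySem.Dict.get?_eq_none_iff_not_mem_keys]
      simpa [PySem.Dict.keys] using hpo
    cases hd : d.get? po.1 with
    | none =>
      simp only [List.foldl_cons, hd]
      rw [ih d hr hdk]
      apply List.filterMap_congr
      intro e he
      have hne : e.1 ≠ po.1 := cp_key_ne_of_get?_none d po.1 hd e he
      rw [show (PySem.Dict.mk (po :: rest)) = PySem.Dict.mk ((po.1, po.2) :: rest) by rfl,
          PySem.Dict.get?_mk_cons]
      simp [(beq_iff_eq).ne.mpr (Ne.symm hne)]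
    | some tag =>
      have huniq : ∀ e ∈ d.items, e.1 = po.1 → e.2 = tag := by
        intro e he hep
        have : d.get? e.1 = some e.2 := PySem.Dict.get?_of_mem_items d (by simpa using he) hdk
        rw [hep, hd] at this
        exact (Option.some.injEq _ _).mp this.symm
      by_cases heq : po.2 = tag.2.2
      · -- del changes[path]
        simp only [List.foldl_cons, hd]
        rw [if_pos heq]
        have hdk' : (d.erase po.1).keys.Nodup := by
          have hsub : (d.erase po.1).keys.Sublist d.keys := by
            simp only [PySem.Dict.keys, PySem.Dict.erase]
            exact List.Sublist.map _ List.filter_sublist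
          exact List.Nodup.sublist hsub hdk
        rw [ih (d.erase po.1) hr hdk']
        exact Eq.symm (cp_filterMap_filter po.1 _ _ d.items
          (fun e he hep => by
            have h2 : e.2.2.2 = po.2 := by rw [huniq e he hep, ← heq]
            rw [show (PySem.Dict.mk (po :: rest)) = PySem.Dict.mk ((po.1, po.2) :: rest) from rfl,
                PySem.Dict.get?_mk_cons, hep]
            simp [h2])
          (fun e he hep => by
            rw [show (PySem.Dict.mk (po :: rest)) = PySem.Dict.mk ((po.1, po.2) :: rest) from rfl,
                PySem.Dict.get?_mk_cons]
            simp [(beq_iff_eq).ne.mpr (Ne.symm hep)]))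
      · -- changes[path] = ("Modified", old, perm)
        have hcont : d.contains po.1 = true := by
          have := PySem.Dict.contains_eq_isSome_get? (d := d) (k := po.1)
          rw [this, hd]; rfl
        simp only [List.foldl_cons, hd]
        rw [if_neg heq]
        have hdk' : (d.insert po.1 ("Modified", some po.2, tag.2.2)).keys.Nodup :=
          PySem.Dict.nodup_keys_insert _ _ _ hdk
        rw [ih _ hr hdk', PySem.Dict.items_insert_of_contains _ _ hcont, List.filterMap_map]
        apply List.filterMap_congr
        intro e he
        by_cases hep : e.1 = po.1
        · have hetag := huniq e he hep
          have hrepl : (if (e.1 == po.1) = true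
                then ((po.1 : String), (("Modified" : String), some po.2, tag.2.2)) else e)
              = (po.1, ("Modified", some po.2, tag.2.2)) := by simp [hep]
          simp only [Function.comp]
          rw [hrepl,
              show (PySem.Dict.mk (po :: rest)) = PySem.Dict.mk ((po.1, po.2) :: rest) from rfl,
              PySem.Dict.get?_mk_cons, hep]
          simp [hrest_none, hetag, heq]
        · have hrepl : (if (e.1 == po.1) = true
                then ((po.1 : String), (("Modified" : String), some po.2, tag.2.2)) else e)
              = e := by simp [hep]
          simp only [Function.comp]
          rw [hrepl,
              show (PySem.Dict.mk (po :: rest)) = PySem.Dict.mk ((po.1, po.2) :: rest) from rfl,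
              PySem.Dict.get?_mk_cons]
          simp [(beq_iff_eq).ne.mpr (Ne.symm hep)]

-- Phase 1 of B: the "all New" dict's items are exactly current mapped, for distinct keys.
theorem cp_phase1_items (current : List (String × String))
    (hnd : (current.map Prod.fst).Nodup) :
    (current.foldl (fun (d : PySem.Dict String (String × Option String × String)) pv =>
      d.insert pv.1 ("New", none, pv.2)) PySem.Dict.empty).items
    = current.map (fun pv => (pv.1, (("New" : String), (none : Option String), pv.2))) := by
  rw [PySem.Dict.items_foldl_insert_fresh current Prod.fst
        (fun pv => (("New" : String), (none : Option String), pv.2)) PySem.Dict.empty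
        (by intro a _; simp [PySem.Dict.contains_empty]) hnd]
  simp [PySem.Dict.empty]

-- B also computes cpRef.
theorem cp_alt_eq_ref (baseline current : List (String × String))
    (hb : (baseline.map Prod.fst).Nodup) (hc : (current.map Prod.fst).Nodup) :
    compare_permissions_alt baseline current = cpRef baseline current := by
  unfold compare_permissions_alt
  have hdk : (current.foldl (fun (d : PySem.Dict String (String × Option String × String)) pv =>
      d.insert pv.1 ("New", none, pv.2)) PySem.Dict.empty).keys.Nodup := by
    simp only [PySem.Dict.keys, cp_phase1_items current hc, List.map_map]
    simpa [Function.comp] using hc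
  rw [cp_repair_items baseline _ hb hdk, cp_phase1_items current hc, List.filterMap_map]
  apply List.filterMap_congr
  intro pv _
  cases hg : (PySem.Dict.mk baseline).get? pv.1 with
  | none => simp [Function.comp, hg]
  | some old =>
    by_cases he : old = pv.2 <;> simp [Function.comp, hg, he]

-- ===== VERDICT (by name: the statement is the Claim_ definition above) =====
theorem compare_permissions_spec : Claim_equal_compare_permissions := by
  intro baseline current _ hpre
  obtain ⟨hb, hc⟩ := hpre
  unfold Spec_compare_permissions compare_permissions
  rw [cp_fold_items baseline current PySem.Dict.empty hc
        (by intro p _; simp [PySem.Dict.contains_empty]),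
      cp_alt_eq_ref baseline current hb hc]
  simp [PySem.Dict.empty]
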